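-- pv_equiv track=rewrite | github.com/seonjaechoi0307/TIL | Self-Study/Code_Test/School_Programers_Traning/2023-11-27.py | solution
-- ===== SOURCE A (Python) =====
-- def solution(arr):
--
--     # 솔루션 정의
--     # 정수 배열 arr가 주어집니다.
--     # 배열 안의 2가 모두 포함된 가장 작은 연속된 부분 배열을 return 하는 solution 함수를 완성해 주세요.
--     # 단, arr에 2가 없는 경우 [-1]을 return 합니다.
--
--     point = []
--     answer = []
--
--     for i in range(len(arr)) :
--
--         if arr[i] == 2 :
--             point.append(i)
--
--     if not point :
--         return [-1]
--
--     else :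
--         min_value = min(point)
--         max_value = max(point) + 1
--         answer = arr[min_value:max_value]
--
--         return answer
-- ===== SOURCE B (Python) =====
-- def solution(arr):
--     def trim_tail(xs):
--         # pop trailing elements until the list is empty or ends with 2
--         xs = list(xs)
--         while xs and xs[-1] != 2:
--             xs.pop()
--         return xs
--     core = trim_tail(trim_tail(arr)[::-1])[::-1]
--     return core if core else [-1]
-- ===== Notes on version B (the rewrite author's own statement) =====
-- stated objective: simpler
-- what changed: B never computes or stores indices: it pops non-2 elements off the tail, reverses and pops the (original) head's non-2 run the same way, and reverses back, whereas A builds the list of all index positions of 2, runs min() and max() over it and slices arr by those indices.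
import Mathlib
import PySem

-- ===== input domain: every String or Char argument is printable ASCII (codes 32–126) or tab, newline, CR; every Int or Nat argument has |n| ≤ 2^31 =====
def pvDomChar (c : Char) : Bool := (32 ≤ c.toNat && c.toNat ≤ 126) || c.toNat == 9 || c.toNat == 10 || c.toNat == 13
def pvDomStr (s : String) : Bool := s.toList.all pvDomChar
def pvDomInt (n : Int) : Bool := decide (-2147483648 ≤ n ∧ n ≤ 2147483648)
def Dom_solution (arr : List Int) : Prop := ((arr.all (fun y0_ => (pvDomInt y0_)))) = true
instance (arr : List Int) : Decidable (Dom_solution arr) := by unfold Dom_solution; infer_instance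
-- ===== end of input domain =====

-- B trims non-2 elements off both ends of the list directly (pop from the tail, reverse, pop again,
-- reverse back), using no indices at all, instead of A's index-list plus min()/max() plus slice (simpler).

-- ===== PORT A =====
-- point = []; for i in range(len(arr)): if arr[i] == 2: point.append(i)
-- if not point: return [-1] else: return arr[min(point):max(point)+1]
def solution (arr : List Int) : List Int :=
  let point : List Int :=
    (PySem.List.pyRange 0 arr.length 1).foldl
      (fun p i => if PySem.List.pyGetD arr i 0 = 2 then p ++ [i] else p) []
  if point = [] then [-1]
  else
    let min_value := (PySem.List.min? point (fun x => x)).getD 0   -- point ≠ [], so getD never fires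
    let max_value := (PySem.List.max? point (fun x => x)).getD 0 + 1
    PySem.List.slice arr (some min_value) (some max_value)

-- ===== PORT B =====
-- def trim_tail(xs): xs = list(xs); while xs and xs[-1] != 2: xs.pop(); return xs
-- the pop-from-the-end while loop, realised as structural recursion on the reversed list (exact)
def popTailWhile : List Int → List Int
  | [] => []
  | x :: t => if x ≠ 2 then popTailWhile t else x :: t

def trimTail (xs : List Int) : List Int := (popTailWhile xs.reverse).reverse

-- core = trim_tail(trim_tail(arr)[::-1])[::-1]; return core if core else [-1]
def solution_alt (arr : List Int) : List Int :=
  let core := (trimTail ((trimTail arr).reverse)).reverse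
  if core = [] then [-1] else core

-- ===== PRECONDITION & SPEC =====
def Spec_solution (arr : List Int) (out : List Int) : Prop := out = solution_alt arr
instance (arr : List Int) (out : List Int) : Decidable (Spec_solution arr out) := by unfold Spec_solution; infer_instance

-- ===== CLAIM (what is proved, stated in full; the proofs are below) =====
def Claim_equal_solution : Prop := ∀ (arr : List Int), Dom_solution arr → Spec_solution arr (solution arr)

-- ===== LEMMAS AND PROOFS =====

-- the (Nat) index positions of 2 in arr, in increasing order — the common normal form
def idxs (arr : List Int) : List Nat :=
  (List.range arr.length).filter (fun i => arr.getD i 0 = 2)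

-- A's and B's common normal form
def anf (arr : List Int) : List Int :=
  match idxs arr with
  | [] => [-1]
  | f :: rest => (arr.drop f).take ((f :: rest).getLastD 0 + 1 - f)

theorem solution_alt_eq (arr : List Int) :
    solution_alt arr =
      if (trimTail ((trimTail arr).reverse)).reverse = [] then [-1]
      else (trimTail ((trimTail arr).reverse)).reverse := rfl

theorem idxs_cons (x : Int) (t : List Int) :
    idxs (x :: t) =
      if x = 2 then 0 :: (idxs t).map (· + 1) else (idxs t).map (· + 1) := by
  unfold idxs
  simp only [List.length_cons]
  rw [List.range_succ_eq_map, List.filter_cons, List.filter_map]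
  by_cases hx : x = 2
  · simp [hx, Function.comp_def]
    exact List.map_congr_left (fun a _ => rfl)
  · simp [hx, Function.comp_def]
    exact List.map_congr_left (fun a _ => rfl)

theorem idxs_nil_iff (t : List Int) : idxs t = [] ↔ 2 ∉ t := by
  induction t with
  | nil => simp [idxs]
  | cons x t ih =>
    rw [idxs_cons]
    by_cases hx : x = 2
    · simp [hx]
    · simp [hx, ih, Ne.symm hx]

theorem idxs_pairwise (arr : List Int) : (idxs arr).Pairwise (· < ·) :=
  List.Pairwise.filter _ List.pairwise_lt_range

theorem getLastD_map_add_one (f : Nat) (r : List Nat) :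
    ((f + 1) :: r.map (fun x => x + 1)).getLastD 0 = (f :: r).getLastD 0 + 1 := by
  induction r generalizing f with
  | nil => rfl
  | cons y r ih => simpa [List.getLastD_cons] using ih y

theorem getLastD_map_cast (f : Nat) (r : List Nat) :
    ((f : Int) :: r.map (Nat.cast : Nat → Int)).getLastD 0 = ((f :: r).getLastD 0 : Nat) := by
  induction r generalizing f with
  | nil => rfl
  | cons y r ih => simpa [List.getLastD_cons] using ih y

-- ---- B-side characterisation ----

theorem popTailWhile_of_not_mem (l : List Int) (h : 2 ∉ l) : popTailWhile l = [] := by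
  induction l with
  | nil => rfl
  | cons x t ih =>
    have hx : x ≠ 2 := by intro e; exact h (by simp [e])
    simp only [popTailWhile, if_pos hx]
    exact ih (fun m => h (by simp [m]))

theorem popTailWhile_append_of_mem (l m : List Int) (h : 2 ∈ l) :
    popTailWhile (l ++ m) = popTailWhile l ++ m := by
  induction l with
  | nil => simp at h
  | cons x t ih =>
    by_cases hx : x = 2
    · simp [popTailWhile, hx]
    · have hm : 2 ∈ t := by
        rcases List.mem_cons.mp h with h' | h'
        · exact absurd h'.symm hx
        · exact h'
      simp [popTailWhile, hx, ih hm]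

theorem popTailWhile_append_of_not_mem (l m : List Int) (h : 2 ∉ l) :
    popTailWhile (l ++ m) = popTailWhile m := by
  induction l with
  | nil => rfl
  | cons x t ih =>
    have hx : x ≠ 2 := by intro e; exact h (by simp [e])
    simp only [List.cons_append, popTailWhile, if_pos hx]
    exact ih (fun hm => h (by simp [hm]))

theorem idxs_cons_mem (t : List Int) (f : Nat) (r : List Nat) (h : idxs t = f :: r) :
    2 ∈ t := by
  by_contra hni
  rw [(idxs_nil_iff t).mpr hni] at h
  exact (List.cons_ne_nil _ _) h.symm

-- reverse-trim-reverse takes the prefix up to (and including) the last 2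
theorem trimR_eq_take (t : List Int) (f : Nat) (r : List Nat) (h : idxs t = f :: r) :
    (popTailWhile t.reverse).reverse = t.take ((f :: r).getLastD 0 + 1) := by
  induction t generalizing f r with
  | nil => simp [idxs] at h
  | cons x t' ih =>
    rw [idxs_cons] at h
    by_cases hx : x = 2
    · rw [if_pos hx] at h
      rcases hr : idxs t' with _ | ⟨f', r'⟩
      · have h2 : 2 ∉ t' := (idxs_nil_iff t').mp hr
        rw [hr] at h
        simp only [List.map_nil] at h
        obtain ⟨hf, hrr⟩ := List.cons.inj h
        subst hx
        rw [List.reverse_cons,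
          popTailWhile_append_of_not_mem _ _ (by simpa using h2)]
        simp [popTailWhile, ← hf, ← hrr]
      · have h2 : 2 ∈ t' := idxs_cons_mem t' f' r' hr
        subst hx
        rw [List.reverse_cons, popTailWhile_append_of_mem _ _ (by simpa using h2),
          List.reverse_append, ih f' r' hr]
        rw [hr] at h
        obtain ⟨hf, hrr⟩ := List.cons.inj h
        rw [← hf, ← hrr]
        have hg : ((0 : Nat) :: ((f' :: r').map (· + 1))).getLastD 0
            = (f' :: r').getLastD 0 + 1 := by
          rw [List.getLastD_cons, ← getLastD_map_add_one]
          cases r' <;> simp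
        rw [hg]
        simp [List.take_succ_cons]
    · rw [if_neg hx] at h
      rcases hr : idxs t' with _ | ⟨f', r'⟩
      · rw [hr] at h; simp at h
      · have h2 : 2 ∈ t' := idxs_cons_mem t' f' r' hr
        rw [List.reverse_cons, popTailWhile_append_of_mem _ _ (by simpa using h2),
          List.reverse_append, ih f' r' hr]
        rw [hr] at h
        obtain ⟨hf, hrr⟩ := List.cons.inj h
        rw [← hf, ← hrr, getLastD_map_add_one]
        simp [List.take_succ_cons]

theorem getLastD_irrel (y : Nat) (r : List Nat) (d : Nat) :
    (y :: r).getLastD d = (y :: r).getLastD 0 := by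
  rw [List.getLastD_cons, List.getLastD_cons]

theorem le_getLastD (r : List Nat) (f : Nat) (h : (f :: r).Pairwise (· < ·)) :
    f ≤ (f :: r).getLastD 0 := by
  induction r generalizing f with
  | nil => exact le_refl f
  | cons y r ih =>
    have hfy : f < y := (List.pairwise_cons.mp h).1 y (by simp)
    have := ih y (List.pairwise_cons.mp h).2
    rw [List.getLastD_cons, getLastD_irrel]
    omega

theorem idxs_head_lt (l : List Int) (f : Nat) (r : List Nat) (h : idxs l = f :: r) :
    f < l.length := by
  have hm : f ∈ idxs l := by rw [h]; simp
  unfold idxs at hm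
  have := List.mem_filter.mp hm
  simpa using this.1

-- front-trimming a prefix that still contains the first 2 drops exactly the first f elements
theorem popTailWhile_take (l : List Int) (f : Nat) (r : List Nat) (h : idxs l = f :: r)
    (m : Nat) (hm : f < m) : popTailWhile (l.take m) = (l.drop f).take (m - f) := by
  induction l generalizing f r m with
  | nil => simp [idxs] at h
  | cons x t ih =>
    rw [idxs_cons] at h
    obtain ⟨k, rfl⟩ : ∃ k, m = k + 1 := ⟨m - 1, by omega⟩
    by_cases hx : x = 2
    · rw [if_pos hx] at h
      obtain ⟨hf, -⟩ := List.cons.inj h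
      subst hx
      simp [popTailWhile, List.take_succ_cons, ← hf]
    · rw [if_neg hx] at h
      rcases hr : idxs t with _ | ⟨f', r'⟩
      · rw [hr] at h; simp at h
      · rw [hr] at h
        obtain ⟨hf, -⟩ := List.cons.inj h
        have hf' : f' + 1 = f := hf
        simp only [List.take_succ_cons, popTailWhile, if_pos hx]
        rw [ih f' r' hr k (by omega)]
        rw [← hf']
        simp only [List.drop_succ_cons]
        congr 1
        omega

theorem B_eq_anf (arr : List Int) : solution_alt arr = anf arr := by
  rw [solution_alt_eq]
  have hcore : (trimTail ((trimTail arr).reverse)).reverse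
      = popTailWhile ((popTailWhile arr.reverse).reverse) := by
    unfold trimTail
    rw [List.reverse_reverse, List.reverse_reverse]
  rw [hcore]
  rcases hr : idxs arr with _ | ⟨f, r⟩
  · have h2 : 2 ∉ arr := (idxs_nil_iff arr).mp hr
    rw [popTailWhile_of_not_mem arr.reverse (by simpa using h2)]
    simp only [List.reverse_nil]
    rw [popTailWhile_of_not_mem [] (by simp)]
    unfold anf
    rw [hr]
    simp
  · have htake : (popTailWhile arr.reverse).reverse
        = arr.take ((f :: r).getLastD 0 + 1) := trimR_eq_take arr f r hr
    have hfL : f ≤ (f :: r).getLastD 0 := by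
      have := idxs_pairwise arr
      rw [hr] at this
      exact le_getLastD r f this
    rw [htake, popTailWhile_take arr f r hr ((f :: r).getLastD 0 + 1) (by omega)]
    have hlen : f < arr.length := idxs_head_lt arr f r hr
    have hne : (arr.drop f).take ((f :: r).getLastD 0 + 1 - f) ≠ [] := by
      rw [Ne, List.take_eq_nil_iff]
      push Not
      constructor
      · omega
      · rw [Ne, List.drop_eq_nil_iff]
        omega
    rw [if_neg hne]
    unfold anf
    rw [hr]

-- ---- A-side reduction ----

theorem foldl_append_if_filter (p : Int → Prop) [DecidablePred p]
    (l acc : List Int) :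
    l.foldl (fun a x => if p x then a ++ [x] else a) acc
      = acc ++ l.filter (fun x => decide (p x)) := by
  induction l generalizing acc with
  | nil => simp
  | cons x t ih =>
    rw [List.foldl_cons, List.filter_cons]
    by_cases hx : p x
    · rw [if_pos hx, ih]
      simp [hx]
    · rw [if_neg hx, ih]
      simp [hx]

theorem foldl_min_of_lb (x : Int) (t : List Int) (h : ∀ y ∈ t, x ≤ y) :
    t.foldl min x = x := by
  induction t with
  | nil => rfl
  | cons y t ih =>
    have hy : x ≤ y := h y (by simp)
    simp only [List.foldl_cons, min_eq_left hy]
    exact ih (fun z hz => h z (by simp [hz]))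

theorem foldl_max_of_sorted (x : Int) (t : List Int) (h : (x :: t).Pairwise (· < ·)) :
    t.foldl max x = (x :: t).getLastD 0 := by
  induction t generalizing x with
  | nil => rfl
  | cons y t ih =>
    have hxy : x < y := (List.pairwise_cons.mp h).1 y (by simp)
    simp only [List.foldl_cons, max_eq_right (le_of_lt hxy)]
    rw [ih y (List.pairwise_cons.mp h).2]
    simp

-- A's index list is exactly idxs arr, cast to Int
theorem point_eq (arr : List Int) :
    (PySem.List.pyRange 0 arr.length 1).filter
        (fun i => decide (PySem.List.pyGetD arr i 0 = 2))
      = (idxs arr).map (Nat.cast : Nat → Int) := by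
  rw [PySem.List.pyRange_one, List.filter_map]
  have hn : ((arr.length : Int) - 0).toNat = arr.length := by omega
  rw [hn]
  unfold idxs
  have hmapf : (fun k : Nat => (0 : Int) + ↑k) = (Nat.cast : Nat → Int) := by
    funext k; simp
  rw [hmapf]
  congr 1
  apply List.filter_congr
  intro k _
  simp [PySem.List.pyGetD_natCast]

theorem pairwise_cast (l : List Nat) (h : l.Pairwise (· < ·)) :
    (l.map (Nat.cast : Nat → Int)).Pairwise (· < ·) := by
  rw [List.pairwise_map]
  exact h.imp (fun hab => by exact_mod_cast hab)

theorem A_eq_anf (arr : List Int) : solution arr = anf arr := by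
  unfold solution
  rw [foldl_append_if_filter (fun i => PySem.List.pyGetD arr i 0 = 2), List.nil_append,
    point_eq]
  rcases hr : idxs arr with _ | ⟨f, rest⟩
  · unfold anf
    rw [hr]
    simp
  · have hpw : ((f :: rest).map (Nat.cast : Nat → Int)).Pairwise (· < ·) := by
      have := idxs_pairwise arr
      rw [hr] at this
      exact pairwise_cast _ this
    rw [if_neg (by simp)]
    simp only [List.map_cons] at hpw ⊢
    rw [PySem.List.min?_id_cons, PySem.List.max?_id_cons, Option.getD_some, Option.getD_some]
    rw [foldl_min_of_lb _ _ (fun y hy => le_of_lt ((List.pairwise_cons.mp hpw).1 y hy))]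
    rw [foldl_max_of_sorted _ _ hpw]
    rw [getLastD_map_cast f rest]
    have hb : ((((f :: rest).getLastD 0 : Nat) : Int) + 1)
        = (((f :: rest).getLastD 0 + 1 : Nat) : Int) := by push_cast; ring
    rw [hb, PySem.List.slice_natCast]
    unfold anf
    rw [hr]

-- ===== VERDICT (by name: the statement is the Claim_ definition above) =====
theorem solution_spec : Claim_equal_solution := by
  intro arr _
  unfold Spec_solution
  rw [A_eq_anf, B_eq_anf]
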